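-- pv_equiv track=rewrite | github.com/Xyzair/Advent-of-Code-2023 | Day 2.py | round_compare
-- ===== SOURCE A (Python) =====
-- def round_compare(red, green, blue, game):
--     valid = True
--
--     for round in game:
--
--         if round[0] > red:
--             valid = False
--
--         elif round[1] > green:
--             valid = False
--
--         elif round[2] > blue:
--             valid = False
--
--     return valid
-- ===== SOURCE B (Python) =====
-- def round_compare(red, green, blue, game):
--     return (max((r[0] for r in game), default=red) <= red
--             and max((r[1] for r in game), default=green) <= green
--             and max((r[2] for r in game), default=blue) <= blue)
-- ===== Notes on version B (the rewrite author's own statement) =====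
-- stated objective: alternative
-- what changed: Replaces A's single row-wise flag loop with three per-channel max reductions (each defaulting to its own limit for empty games) compared against the limits.
import Mathlib
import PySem

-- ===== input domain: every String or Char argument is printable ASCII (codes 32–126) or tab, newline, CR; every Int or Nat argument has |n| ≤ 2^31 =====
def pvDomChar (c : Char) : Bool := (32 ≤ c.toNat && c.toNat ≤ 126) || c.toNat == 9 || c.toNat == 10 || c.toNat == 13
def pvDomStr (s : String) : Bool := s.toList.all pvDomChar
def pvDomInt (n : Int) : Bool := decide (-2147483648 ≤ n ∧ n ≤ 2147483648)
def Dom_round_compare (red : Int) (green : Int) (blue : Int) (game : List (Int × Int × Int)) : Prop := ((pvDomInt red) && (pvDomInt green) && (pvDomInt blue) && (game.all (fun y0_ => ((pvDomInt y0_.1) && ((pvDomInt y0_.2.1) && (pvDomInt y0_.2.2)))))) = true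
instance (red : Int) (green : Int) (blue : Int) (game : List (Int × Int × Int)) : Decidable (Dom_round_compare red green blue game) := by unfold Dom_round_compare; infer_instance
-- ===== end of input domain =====

-- B replaces A's row-wise validity-flag loop by three per-channel max reductions
-- (defaulting to the limit itself on an empty game) compared against the limits;
-- objective: alternative decomposition, same O(n) return value.

-- ===== PORT A =====
def round_compare (red : Int) (green : Int) (blue : Int) (game : List (Int × Int × Int)) : Bool :=
  game.foldl (fun valid r =>
    if r.1 > red then false
    else if r.2.1 > green then false
    else if r.2.2 > blue then false
    else valid) true

-- ===== PORT B =====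
-- Python's max(iterable, default=d): d if empty, else fold of max over the elements.
def pyMaxD (xs : List Int) (d : Int) : Int :=
  match xs with
  | [] => d
  | h :: t => t.foldl max h

def round_compare_alt (red : Int) (green : Int) (blue : Int) (game : List (Int × Int × Int)) : Bool :=
  decide (pyMaxD (game.map (·.1)) red ≤ red)
    && decide (pyMaxD (game.map (·.2.1)) green ≤ green)
    && decide (pyMaxD (game.map (·.2.2)) blue ≤ blue)

-- ===== PRECONDITION & SPEC =====
def Spec_round_compare (red : Int) (green : Int) (blue : Int) (game : List (Int × Int × Int)) (out : Bool) : Prop := out = round_compare_alt red green blue game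
instance (red : Int) (green : Int) (blue : Int) (game : List (Int × Int × Int)) (out : Bool) : Decidable (Spec_round_compare red green blue game out) := by unfold Spec_round_compare; infer_instance

-- ===== CLAIM (what is proved, stated in full; the proofs are below) =====
def Claim_equal_round_compare : Prop := ∀ (red : Int) (green : Int) (blue : Int) (game : List (Int × Int × Int)), Dom_round_compare red green blue game → Spec_round_compare red green blue game (round_compare red green blue game)

-- ===== LEMMAS AND PROOFS =====

-- A's flag fold equals acc && "every round is within the limits".
theorem foldA_eq_all (red green blue : Int) (game : List (Int × Int × Int)) (acc : Bool) :
    game.foldl (fun valid r =>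
      if r.1 > red then false
      else if r.2.1 > green then false
      else if r.2.2 > blue then false
      else valid) acc
    = (acc && game.all (fun r => decide (r.1 ≤ red) && decide (r.2.1 ≤ green) && decide (r.2.2 ≤ blue))) := by
  induction game generalizing acc with
  | nil => simp
  | cons h t ih =>
    have step : (if h.1 > red then false
        else if h.2.1 > green then false
        else if h.2.2 > blue then false else acc)
        = (acc && (decide (h.1 ≤ red) && decide (h.2.1 ≤ green) && decide (h.2.2 ≤ blue))) := by
      split_ifs with h1 h2 h3 <;> simp_all
    simp only [List.foldl_cons, List.all_cons, step, ih, Bool.and_assoc]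

theorem foldl_max_le (t : List Int) (h lim : Int) :
    (t.foldl max h ≤ lim) ↔ (h ≤ lim ∧ ∀ x ∈ t, x ≤ lim) := by
  induction t generalizing h with
  | nil => simp
  | cons a t ih =>
    simp only [List.foldl_cons, ih, List.mem_cons]
    constructor
    · rintro ⟨hm, hall⟩
      refine ⟨le_trans (le_max_left _ _) hm, fun x hx => ?_⟩
      rcases hx with rfl | hx
      · exact le_trans (le_max_right _ _) hm
      · exact hall x hx
    · rintro ⟨hh, hall⟩
      exact ⟨max_le hh (hall a (Or.inl rfl)), fun x hx => hall x (Or.inr hx)⟩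

-- B's channel test equals "every projected value is within the limit".
theorem pyMaxD_le_iff (xs : List Int) (lim : Int) :
    (pyMaxD xs lim ≤ lim) ↔ ∀ x ∈ xs, x ≤ lim := by
  cases xs with
  | nil => simp [pyMaxD]
  | cons h t =>
    simp only [pyMaxD, foldl_max_le, List.mem_cons]
    constructor
    · rintro ⟨hh, hall⟩ x hx
      rcases hx with rfl | hx
      · exact hh
      · exact hall x hx
    · intro hall
      exact ⟨hall h (Or.inl rfl), fun x hx => hall x (Or.inr hx)⟩

-- ===== VERDICT (by name: the statement is the Claim_ definition above) =====
theorem round_compare_spec : Claim_equal_round_compare := by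
  intro red green blue game _
  show round_compare red green blue game = round_compare_alt red green blue game
  unfold round_compare round_compare_alt
  rw [foldA_eq_all]
  simp only [Bool.true_and]
  rw [Bool.eq_iff_iff]
  simp only [List.all_eq_true, Bool.and_eq_true, decide_eq_true_eq, pyMaxD_le_iff, List.mem_map]
  constructor
  · intro h
    refine ⟨⟨fun x hx => ?_, fun x hx => ?_⟩, fun x hx => ?_⟩ <;>
      (obtain ⟨a, ha, rfl⟩ := hx)
    · exact (h a ha).1.1
    · exact (h a ha).1.2
    · exact (h a ha).2
  · rintro ⟨⟨h1, h2⟩, h3⟩ r hr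
    exact ⟨⟨h1 _ ⟨r, hr, rfl⟩, h2 _ ⟨r, hr, rfl⟩⟩, h3 _ ⟨r, hr, rfl⟩⟩
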